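-- pv_equiv track=rewrite | github.com/Cybergenik/AoC | 2023/day13/part2.py | off_by_one
-- ===== SOURCE A (Python) =====
-- def off_by_one(left, right):
--     one = False
--     for l, r in zip(left, right):
--         if l != r:
--             if not one:
--                 one = True
--             else:
--                 return False
--     return True
-- ===== SOURCE B (Python) =====
-- def off_by_one(left, right):
--     n = min(len(left), len(right))
--     i = 0
--     while i < n and left[i] == right[i]:
--         i += 1
--     # either no mismatch in the overlap (empty slices), or skip the one
--     # mismatching position and require the rest of the overlap to be identical
--     return left[i + 1:n] == right[i + 1:n]
-- ===== Notes on version B (the rewrite author's own statement) =====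
-- stated objective: alternative
-- what changed: Instead of scanning with a mismatch flag/counter, B finds the index of the first mismatch in the common overlap and then decides by a single slice equality test on everything after that index.
import Mathlib
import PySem

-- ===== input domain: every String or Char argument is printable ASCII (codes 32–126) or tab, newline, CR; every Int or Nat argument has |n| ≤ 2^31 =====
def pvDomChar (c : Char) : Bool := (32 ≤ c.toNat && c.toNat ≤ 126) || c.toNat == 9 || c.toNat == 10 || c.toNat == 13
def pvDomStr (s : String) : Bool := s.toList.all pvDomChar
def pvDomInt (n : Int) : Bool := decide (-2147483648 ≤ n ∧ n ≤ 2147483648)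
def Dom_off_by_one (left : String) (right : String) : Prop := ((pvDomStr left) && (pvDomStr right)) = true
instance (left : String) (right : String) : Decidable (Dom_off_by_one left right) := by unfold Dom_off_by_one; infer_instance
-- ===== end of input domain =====

-- B is an alternative decomposition: find the first mismatch index in the overlap,
-- then decide by one slice-equality test on everything after it (no flag, no counter).

-- ===== PORT A =====
-- loop over zip(left,right) carrying the `one` flag; `false` plays the early `return False`
def offByOneLoopA : List (Char × Char) → Bool → Bool
  | [], _ => true
  | (l, r) :: rest, one =>
      if l ≠ r then
        if !one then offByOneLoopA rest true
        else false
      else offByOneLoopA rest one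

def off_by_one (left : String) (right : String) : Bool :=
  offByOneLoopA (List.zip left.toList right.toList) false

-- ===== PORT B =====
-- the `while i < n and left[i] == right[i]: i += 1` loop: index of the first
-- mismatch within the overlap (= min length when there is none)
def firstMismatchIdx : List Char → List Char → Nat
  | l :: ls, r :: rs => if l = r then firstMismatchIdx ls rs + 1 else 0
  | _, _ => 0

-- `left[i+1:n] == right[i+1:n]` with 0 ≤ i+1 ≤ n ≤ len: the Python slice is
-- exactly drop (i+1) then take (n-(i+1)) (both clamp the same way here)
def off_by_one_alt (left : String) (right : String) : Bool :=
  let ls := left.toList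
  let rs := right.toList
  let n := min ls.length rs.length
  let i := firstMismatchIdx ls rs
  decide ((ls.drop (i + 1)).take (n - (i + 1)) = (rs.drop (i + 1)).take (n - (i + 1)))

-- ===== PRECONDITION & SPEC =====
def Spec_off_by_one (left : String) (right : String) (out : Bool) : Prop := out = off_by_one_alt left right
instance (left : String) (right : String) (out : Bool) : Decidable (Spec_off_by_one left right out) := by unfold Spec_off_by_one; infer_instance

-- ===== CLAIM (what is proved, stated in full; the proofs are below) =====
def Claim_equal_off_by_one : Prop := ∀ (left : String) (right : String), Dom_off_by_one left right → Spec_off_by_one left right (off_by_one left right)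

-- ===== LEMMAS AND PROOFS =====
-- A's loop with the flag already set accepts iff the rest of the zip is all-equal
lemma loopA_true_eq (zs : List (Char × Char)) :
    offByOneLoopA zs true = zs.all (fun p => p.1 == p.2) := by
  induction zs with
  | nil => simp [offByOneLoopA]
  | cons hd tl ih =>
      obtain ⟨l, r⟩ := hd
      by_cases h : l = r <;> simp [offByOneLoopA, h, ih]

-- zip-all-equal = equality of the overlap prefixes
lemma zip_all_eq_take (a b : List Char) :
    (List.zip a b).all (fun p => p.1 == p.2)
      = decide (a.take (min a.length b.length) = b.take (min a.length b.length)) := by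
  induction a generalizing b with
  | nil => simp
  | cons x xs ih =>
      cases b with
      | nil => simp
      | cons y ys =>
          simp only [List.zip_cons_cons, List.all_cons, List.length_cons,
            Nat.succ_min_succ, List.take_succ_cons, ih]
          by_cases h : x = y <;> simp [h]

lemma ports_eq (a b : List Char) :
    offByOneLoopA (List.zip a b) false
      = decide ((a.drop (firstMismatchIdx a b + 1)).take
                  (min a.length b.length - (firstMismatchIdx a b + 1))
              = (b.drop (firstMismatchIdx a b + 1)).take
                  (min a.length b.length - (firstMismatchIdx a b + 1))) := by
  induction a generalizing b with
  | nil => simp [offByOneLoopA, firstMismatchIdx]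
  | cons x xs ih =>
      cases b with
      | nil => simp [offByOneLoopA, firstMismatchIdx]
      | cons y ys =>
          by_cases h : x = y
          · simpa [offByOneLoopA, firstMismatchIdx, h, Nat.succ_min_succ,
              Nat.succ_sub_succ] using ih ys
          · simp only [List.zip_cons_cons, offByOneLoopA, h,
              ne_eq, not_false_eq_true, Bool.not_false, if_pos,
              firstMismatchIdx]
            rw [loopA_true_eq, zip_all_eq_take]
            simp [Nat.succ_min_succ]

-- ===== VERDICT (by name: the statement is the Claim_ definition above) =====
theorem off_by_one_spec : Claim_equal_off_by_one := by
  intro left right _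
  unfold Spec_off_by_one off_by_one off_by_one_alt
  exact ports_eq _ _
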